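-- pv_equiv track=rewrite | github.com/rebuilder945/FL_research | ast_research/python_code_5.23/lastterm_page6/success_code/刘倩-2899-2023-04-27_17_35_45.py | find_unique_combinations
-- ===== SOURCE A (Python) =====
-- def find_unique_combinations(n, m):
--     if n < 0 or m > 9 or n >= m:
--         return "illegal input"
--
--     combinations = []
--     for i in range(n, m):
--         for j in range(n, m):
--             if j == i:
--                 continue
--             for k in range(n, m):
--                 if k == i or k == j:
--                     continue
--                 combinations.append(str(i) + str(j) + str(k))
--
--     if not combinations:
--         return "illegal input"
--
--     return ' '.join(combinations)
-- ===== SOURCE B (Python) =====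
-- def find_unique_combinations(n, m):
--     if n < 0 or m > 9 or n >= m:
--         return "illegal input"
--
--     def perms(pool, r):
--         # all length-r permutation strings of the distinct values in pool
--         if r == 0:
--             return ['']
--         return [str(x) + tail
--                 for x in pool
--                 for tail in perms([y for y in pool if y != x], r - 1)]
--
--     combos = perms(list(range(n, m)), 3)
--     if not combos:
--         return "illegal input"
--     return ' '.join(combos)
-- ===== Notes on version B (the rewrite author's own statement) =====
-- stated objective: alternative
-- what changed: The triple nested loop with equality-skip guards is replaced by a recursive distinct-permutation generator perms(pool, r) that picks each element and recurses on the pool with that element filtered out.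
import Mathlib
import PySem

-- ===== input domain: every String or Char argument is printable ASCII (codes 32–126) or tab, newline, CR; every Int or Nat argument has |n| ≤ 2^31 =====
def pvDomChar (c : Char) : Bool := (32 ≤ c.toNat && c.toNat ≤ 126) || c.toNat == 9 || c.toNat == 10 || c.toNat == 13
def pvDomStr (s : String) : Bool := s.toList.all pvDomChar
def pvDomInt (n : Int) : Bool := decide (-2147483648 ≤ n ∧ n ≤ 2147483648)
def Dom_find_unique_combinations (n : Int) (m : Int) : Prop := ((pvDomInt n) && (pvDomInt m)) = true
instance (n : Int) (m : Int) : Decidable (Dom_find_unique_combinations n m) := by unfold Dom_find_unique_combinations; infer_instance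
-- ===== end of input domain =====

-- B replaces the triple nested loop by a recursive distinct-permutation generator (alternative decomposition, same cost).

-- ===== PORT A =====
def find_unique_combinations (n : Int) (m : Int) : String :=
  if n < 0 ∨ m > 9 ∨ n ≥ m then "illegal input"
  else
    let combinations : List String :=
      (PySem.List.pyRange n m 1).foldl (fun acc i =>
        (PySem.List.pyRange n m 1).foldl (fun acc j =>
          if j = i then acc
          else
            (PySem.List.pyRange n m 1).foldl (fun acc k =>
              if k = i ∨ k = j then acc
              else acc ++ [PySem.Int.toStr i ++ PySem.Int.toStr j ++ PySem.Int.toStr k]) acc) acc) []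
    if combinations = [] then "illegal input"
    else PySem.Str.join " " combinations

-- ===== PORT B =====
-- helper: perms(pool, r) from Source B — all length-r permutation strings of the distinct values in pool
def pvPerms : List Int → Nat → List String
  | _, 0 => [""]
  | pool, r + 1 =>
      pool.flatMap (fun x =>
        (pvPerms (pool.filter (fun y => y ≠ x)) r).map (fun tail => PySem.Int.toStr x ++ tail))

def find_unique_combinations_alt (n : Int) (m : Int) : String :=
  if n < 0 ∨ m > 9 ∨ n ≥ m then "illegal input"
  else
    let combos := pvPerms (PySem.List.pyRange n m 1) 3
    if combos = [] then "illegal input"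
    else PySem.Str.join " " combos

-- ===== PRECONDITION & SPEC =====
def Spec_find_unique_combinations (n : Int) (m : Int) (out : String) : Prop := out = find_unique_combinations_alt n m
instance (n : Int) (m : Int) (out : String) : Decidable (Spec_find_unique_combinations n m out) := by unfold Spec_find_unique_combinations; infer_instance

-- ===== CLAIM (what is proved, stated in full; the proofs are below) =====
def Claim_equal_find_unique_combinations : Prop := ∀ (n : Int) (m : Int), Dom_find_unique_combinations n m → Spec_find_unique_combinations n m (find_unique_combinations n m)

-- ===== LEMMAS AND PROOFS =====

-- 'for x in l: if p(x): continue; out.append(f(x))' appends the filtered map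
theorem pvFoldSkipSingleton {α β : Type} (p : α → Prop) [DecidablePred p] (f : α → β) :
    ∀ (l : List α) (acc : List β),
      l.foldl (fun acc x => if p x then acc else acc ++ [f x]) acc
        = acc ++ (l.filter (fun x => !(decide (p x)))).map f := by
  intro l
  induction l with
  | nil => intro acc; simp
  | cons h t ih => intro acc; by_cases hp : p h <;> simp [hp, ih]

-- same with a list-valued body ('continue' guard around an inner loop that extends out)
theorem pvFoldSkipFlat {α β : Type} (p : α → Prop) [DecidablePred p] (g : α → List β) :
    ∀ (l : List α) (acc : List β),
      l.foldl (fun acc x => if p x then acc else acc ++ g x) acc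
        = acc ++ (l.filter (fun x => !(decide (p x)))).flatMap g := by
  intro l
  induction l with
  | nil => intro acc; simp
  | cons h t ih => intro acc; by_cases hp : p h <;> simp [hp, ih]

theorem pvFlatMapSing {α β : Type} (f : α → β) (l : List α) :
    l.flatMap (fun x => [f x]) = l.map f := by
  induction l with
  | nil => simp
  | cons h t ih => simp [ih]

theorem pvPerms_three (R : List Int) :
    pvPerms R 3
      = R.flatMap (fun i =>
          (R.filter (fun j => !(decide (j = i)))).flatMap (fun j =>
            (R.filter (fun k => !(decide (k = i ∨ k = j)))).map (fun k =>
              PySem.Int.toStr i ++ PySem.Int.toStr j ++ PySem.Int.toStr k))) := by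
  simp only [pvPerms]
  simp [List.map_flatMap, List.map_map, Function.comp_def, List.filter_filter, pvFlatMapSing,
    String.append_assoc, decide_not, Bool.not_or, ne_eq, Bool.and_comm]

theorem pvLoopEqPerms (R : List Int) :
    R.foldl (fun acc i =>
        R.foldl (fun acc j =>
          if j = i then acc
          else
            R.foldl (fun acc k =>
              if k = i ∨ k = j then acc
              else acc ++ [PySem.Int.toStr i ++ PySem.Int.toStr j ++ PySem.Int.toStr k]) acc) acc) []
      = pvPerms R 3 := by
  rw [pvPerms_three]
  simp only [pvFoldSkipSingleton, pvFoldSkipFlat]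
  simpa using PySem.List.foldl_append_eq_flatMap _ R []

-- ===== VERDICT (by name: the statement is the Claim_ definition above) =====
theorem find_unique_combinations_spec : Claim_equal_find_unique_combinations := by
  intro n m _
  unfold Spec_find_unique_combinations find_unique_combinations find_unique_combinations_alt
  by_cases hg : n < 0 ∨ m > 9 ∨ n ≥ m
  · simp [hg]
  · simp only [hg, if_false]
    rw [pvLoopEqPerms (PySem.List.pyRange n m 1)]
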